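-- pv_equiv track=rewrite | github.com/HeoSeokYong/AlgorithmStudy | Data_Structure/ppap.py | solution
-- ===== SOURCE A (Python) =====
-- PPAP = ['P', 'P', 'A', 'P']
--
-- def solution(S:str) -> int:
--     stack = []
--
--     for s in S:
--         stack.append(s)
--
--         while stack[-4:] == PPAP:
--             for _ in range(3):
--                 stack.pop()
--
--     if stack == ['P']:
--         return 'PPAP'
--
--     return 'NP'
-- ===== SOURCE B (Python) =====
-- def solution(S: str) -> int:
--     while 'PPAP' in S:
--         S = S.replace('PPAP', 'P')
--     return 'PPAP' if S == 'P' else 'NP'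
-- ===== Notes on version B (the rewrite author's own statement) =====
-- stated objective: simpler
-- what changed: Replaces the char-by-char stack with suffix pops by a global rewrite-to-fixpoint: repeatedly substitute every 'PPAP' by 'P' until none remains, then test the result; correct because the PPAP->P rewrite is confluent, so the normal form is order-independent.
import Mathlib
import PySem

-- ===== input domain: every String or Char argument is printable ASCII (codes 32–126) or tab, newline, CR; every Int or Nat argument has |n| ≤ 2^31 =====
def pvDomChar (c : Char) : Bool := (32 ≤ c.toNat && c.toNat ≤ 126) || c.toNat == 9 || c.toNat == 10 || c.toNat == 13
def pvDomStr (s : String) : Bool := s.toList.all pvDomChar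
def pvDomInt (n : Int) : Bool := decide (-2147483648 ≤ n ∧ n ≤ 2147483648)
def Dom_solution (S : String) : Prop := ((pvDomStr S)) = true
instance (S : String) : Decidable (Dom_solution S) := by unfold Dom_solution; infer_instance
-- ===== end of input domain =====

-- B replaces A's char-by-char stack (with suffix pops) by a rewrite-to-fixpoint:
-- repeatedly substitute every 'PPAP' by 'P' until none remains, then test the result;
-- equal because the PPAP->P rewrite is confluent, so the normal form is order-independent.


-- ===== PORT A =====
-- PPAP = ['P', 'P', 'A', 'P']
def ppapL : List Char := ['P', 'P', 'A', 'P']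

-- slice stack (-4) none = ppapL forces the stack to hold at least 4 elements (used for termination)
theorem slice4_eq_drop (st : List Char) :
    PySem.List.slice st (some (-4)) none = st.drop (st.length - 4) :=
  PySem.List.slice_from_neg_ofNat st 4 (by omega)

theorem four_le_of_slice4 (st : List Char)
    (h : PySem.List.slice st (some (-4)) none = ppapL) : 4 ≤ st.length := by
  rw [slice4_eq_drop] at h
  have := congrArg List.length h
  simp [ppapL] at this
  omega

-- 'while stack[-4:] == PPAP: for _ in range(3): stack.pop()'
-- (stack.pop() removes the LAST element; the guard guarantees ≥ 4 elements, so it never raises)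
def whileLoop (stack : List Char) : List Char :=
  if PySem.List.slice stack (some (-4)) none = ppapL then
    whileLoop ((PySem.List.pyRange 0 3 1).foldl (fun st _ => st.dropLast) stack)
  else stack
termination_by stack.length
decreasing_by
  have h4 := four_le_of_slice4 stack (by assumption)
  show ((PySem.List.pyRange 0 3 1).foldl (fun st _ => st.dropLast) stack).length < stack.length
  have : PySem.List.pyRange 0 3 1 = [0, 1, 2] := by decide
  rw [this]
  simp [List.foldl, List.length_dropLast]
  omega

def solution (S : String) : String :=
  let stack := S.toList.foldl (fun stack s => whileLoop (stack ++ [s])) ([] : List Char)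
  if stack = ['P'] then "PPAP" else "NP"

-- ===== PORT B =====
-- 'PPAP' in S / S.replace('PPAP', 'P'): the replace shrinks the string whenever 'PPAP' occurs
-- (length lemma proved below the claim block is not allowed -> proved here, cited by decreasing_by)

-- a clean recursion computing PySem.Chars.replace l "PPAP" "P" (bridged below)
def repl (l : List Char) : List Char :=
  match l with
  | [] => []
  | c :: t =>
    if ppapL.isPrefixOf (c :: t) then 'P' :: repl (t.drop 3) else c :: repl t
termination_by l.length
decreasing_by
  all_goals simp only [List.length_drop, List.length_cons]
  all_goals omega

theorem repl_length_le (l : List Char) : (repl l).length ≤ l.length := by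
  induction l using repl.induct with
  | case1 => simp [repl]
  | case2 c t h ih =>
    rw [repl, if_pos h]
    have := List.length_drop (l := t) (i := 3)
    simp only [List.length_cons]
    omega
  | case3 c t h ih =>
    rw [repl, if_neg h]
    simpa using ih

theorem repl_length_lt (l : List Char) (h : ppapL <:+: l) : (repl l).length < l.length := by
  induction l using repl.induct with
  | case1 => simp [ppapL] at h
  | case2 c t hp ih =>
    rw [repl, if_pos hp]
    have hle := repl_length_le (t.drop 3)
    have h4 : 4 ≤ (c :: t).length :=
      List.IsPrefix.length_le (List.isPrefixOf_iff_prefix.mp hp)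
    have := List.length_drop (l := t) (i := 3)
    simp only [List.length_cons] at *
    omega
  | case3 c t hp ih =>
    rw [repl, if_neg hp]
    rcases List.infix_cons_iff.mp h with hpre | hinf
    · exact absurd (List.isPrefixOf_iff_prefix.mpr hpre) (by simpa using hp)
    · have := ih hinf
      simp only [List.length_cons]
      omega

-- PySem.Chars.replace.go with sufficient fuel is repl (acc is accumulated reversed)
theorem go_eq_repl : ∀ (fuel : Nat) (l acc : List Char), l.length ≤ fuel →
    PySem.Chars.replace.go ppapL ['P'] fuel l acc = acc.reverse ++ repl l := by
  intro fuel
  induction fuel with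
  | zero =>
    intro l acc h
    have : l = [] := List.length_eq_zero_iff.mp (Nat.le_zero.mp h)
    subst this
    simp [PySem.Chars.replace.go, repl]
  | succ n ih =>
    intro l acc h
    match l with
    | [] => simp [PySem.Chars.replace.go, repl]
    | c :: t =>
      rw [PySem.Chars.replace.go]
      by_cases hp : ppapL.isPrefixOf (c :: t)
      · rw [if_pos hp]
        have hdrop : List.drop ppapL.length (c :: t) = t.drop 3 := by simp [ppapL]
        rw [hdrop]
        have hlen : (t.drop 3).length ≤ n := by
          have := List.length_drop (l := t) (i := 3)
          simp only [List.length_cons] at h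
          omega
        rw [show (['P'] : List Char).reverse ++ acc = 'P' :: acc from rfl, ih _ _ hlen]
        rw [repl, if_pos hp]
        simp
      · rw [if_neg hp]
        have hlen : t.length ≤ n := by simp only [List.length_cons] at h; omega
        rw [ih _ _ hlen, repl, if_neg hp]
        simp

theorem replace_eq_repl (l : List Char) :
    PySem.Chars.replace l ppapL ['P'] = repl l := by
  rw [PySem.Chars.replace]
  rw [if_neg (by simp [ppapL])]
  simpa using go_eq_repl l.length l [] le_rfl

-- 'while "PPAP" in S: S = S.replace("PPAP", "P")'
def loopB (l : List Char) : List Char :=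
  if PySem.Chars.isIn ppapL l then loopB (PySem.Chars.replace l ppapL ['P']) else l
termination_by l.length
decreasing_by
  rw [replace_eq_repl]
  exact repl_length_lt l ((PySem.Chars.isIn_iff_infix ppapL l).mp (by assumption))

def solution_alt (S : String) : String :=
  if loopB S.toList = ['P'] then "PPAP" else "NP"

-- ===== PRECONDITION & SPEC =====
def Spec_solution (S : String) (out : String) : Prop := out = solution_alt S
instance (S : String) (out : String) : Decidable (Spec_solution S out) := by unfold Spec_solution; infer_instance

-- ===== CLAIM (what is proved, stated in full; the proofs are below) =====
def Claim_equal_solution : Prop := ∀ (S : String), Dom_solution S → Spec_solution S (solution S)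

-- ===== LEMMAS AND PROOFS =====

-- A's for-loop as a function of the starting stack
def runA (st l : List Char) : List Char :=
  l.foldl (fun stack s => whileLoop (stack ++ [s])) st

theorem runA_nil (st : List Char) : runA st [] = st := rfl

theorem runA_cons (st : List Char) (c : Char) (l : List Char) :
    runA st (c :: l) = runA (whileLoop (st ++ [c])) l := rfl

theorem runA_append (st l₁ l₂ : List Char) :
    runA st (l₁ ++ l₂) = runA (runA st l₁) l₂ :=
  List.foldl_append

theorem suffix_iff_slice4 (st : List Char) :
    ppapL <:+ st ↔ PySem.List.slice st (some (-4)) none = ppapL := by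
  rw [slice4_eq_drop, List.suffix_iff_eq_drop]
  constructor
  · intro h; exact h.symm
  · intro h; exact h.symm

theorem pop3_concat (u : List Char) (a b c d : Char) :
    (PySem.List.pyRange 0 3 1).foldl (fun st _ => st.dropLast) (u ++ [a, b, c, d]) = u ++ [a] := by
  have : PySem.List.pyRange 0 3 1 = [0, 1, 2] := by decide
  rw [this]
  simp only [List.foldl]
  rw [show u ++ [a, b, c, d] = ((u ++ [a, b, c]) ++ [d] : List Char) by simp,
      List.dropLast_concat,
      show u ++ [a, b, c] = ((u ++ [a, b]) ++ [c] : List Char) by simp,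
      List.dropLast_concat,
      show u ++ [a, b] = ((u ++ [a]) ++ [b] : List Char) by simp,
      List.dropLast_concat]

-- (W2) a stack without a PPAP suffix is left alone
theorem whileLoop_of_not_suffix (st : List Char) (h : ¬ ppapL <:+ st) :
    whileLoop st = st := by
  rw [whileLoop, if_neg (fun hc => h ((suffix_iff_slice4 st).mpr hc))]

-- (W3) one reduction step of the while loop
theorem whileLoop_concat_ppap (u : List Char) :
    whileLoop (u ++ ppapL) = whileLoop (u ++ ['P']) := by
  rw [whileLoop]
  rw [if_pos (by exact (suffix_iff_slice4 (u ++ ppapL)).mp ⟨u, rfl⟩)]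
  rw [show u ++ ppapL = u ++ ['P', 'P', 'A', 'P'] by simp [ppapL], pop3_concat]

-- (W1) the result of the while loop never ends with PPAP
theorem whileLoop_not_suffix (st : List Char) : ¬ ppapL <:+ whileLoop st := by
  induction st using whileLoop.induct with
  | case1 st h ih => rw [whileLoop, if_pos h]; exact ih
  | case2 st h => rw [whileLoop, if_neg h]; exact fun hc => h ((suffix_iff_slice4 st).mp hc)

-- the while loop preserves the last element
theorem whileLoop_getLast? (st : List Char) : (whileLoop st).getLast? = st.getLast? := by
  induction st using whileLoop.induct with
  | case1 st h ih =>
    rw [whileLoop, if_pos h]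
    have hsuf : ppapL <:+ st := (suffix_iff_slice4 st).mpr h
    obtain ⟨u, rfl⟩ := hsuf
    rw [show u ++ ppapL = u ++ ['P', 'P', 'A', 'P'] by simp [ppapL], pop3_concat] at ih ⊢
    rw [ih, List.getLast?_concat,
        show u ++ ['P', 'P', 'A', 'P'] = ((u ++ ['P', 'P', 'A']) ++ ['P'] : List Char) by simp,
        List.getLast?_concat]
  | case2 st h => rw [whileLoop, if_neg h]

-- a word ending with PPAP has last element 'P'
theorem getLast?_of_ppap_suffix (w : List Char) (h : ppapL <:+ w) : w.getLast? = some 'P' := by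
  obtain ⟨u, rfl⟩ := h
  rw [show u ++ ppapL = ((u ++ ['P', 'P', 'A']) ++ ['P'] : List Char) by simp [ppapL],
      List.getLast?_concat]

-- if w ++ [c] ends with PPAP then w ends with 'A'
theorem getLast?_of_ppap_suffix_concat (w : List Char) (c : Char)
    (h : ppapL <:+ w ++ [c]) : w.getLast? = some 'A' := by
  obtain ⟨u, hu⟩ := h
  rw [show u ++ ppapL = ((u ++ ['P', 'P', 'A']) ++ ['P'] : List Char) by simp [ppapL]] at hu
  have hw : u ++ ['P', 'P', 'A'] = w := by
    have := congrArg List.dropLast hu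
    rwa [List.dropLast_concat, List.dropLast_concat] at this
  rw [← hw, show u ++ ['P', 'P', 'A'] = ((u ++ ['P', 'P']) ++ ['A'] : List Char) by simp,
      List.getLast?_concat]

-- CRUX: feeding the four characters P,P,A,P to A's loop is the same as feeding one P
theorem runA_ppap (st : List Char) : runA st ppapL = whileLoop (st ++ ['P']) := by
  have htlast : (whileLoop (st ++ ['P'])).getLast? = some 'P' := by
    rw [whileLoop_getLast?, List.getLast?_concat]
  have htred := whileLoop_not_suffix (st ++ ['P'])
  -- step 2: pushing 'P' appends
  have h2 : whileLoop (whileLoop (st ++ ['P']) ++ ['P']) = whileLoop (st ++ ['P']) ++ ['P'] := by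
    apply whileLoop_of_not_suffix
    intro hc
    rw [getLast?_of_ppap_suffix_concat _ 'P' hc] at htlast
    simp at htlast
  -- step 3: pushing 'A' appends
  have h3 : whileLoop ((whileLoop (st ++ ['P']) ++ ['P']) ++ ['A']) =
      whileLoop (st ++ ['P']) ++ ['P', 'A'] := by
    rw [show (whileLoop (st ++ ['P']) ++ ['P']) ++ ['A'] =
        whileLoop (st ++ ['P']) ++ ['P', 'A'] by simp]
    apply whileLoop_of_not_suffix
    intro hc
    have h5 := getLast?_of_ppap_suffix _ hc
    rw [show whileLoop (st ++ ['P']) ++ ['P', 'A'] =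
        ((whileLoop (st ++ ['P']) ++ ['P']) ++ ['A'] : List Char) by simp,
        List.getLast?_concat] at h5
    simp at h5
  -- step 4: pushing 'P' closes a PPAP and collapses back
  have h4 : whileLoop ((whileLoop (st ++ ['P']) ++ ['P', 'A']) ++ ['P']) =
      whileLoop (st ++ ['P']) := by
    obtain ⟨t', ht'⟩ := List.getLast?_eq_some_iff.mp htlast
    rw [ht', show ((t' ++ ['P']) ++ ['P', 'A']) ++ ['P'] = t' ++ ppapL by simp [ppapL],
        whileLoop_concat_ppap, ← ht']
    exact whileLoop_of_not_suffix _ htred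
  show runA st ['P', 'P', 'A', 'P'] = whileLoop (st ++ ['P'])
  rw [runA_cons, runA_cons, h2, runA_cons, h3, runA_cons, h4, runA_nil]

-- a PPAP-free tail is just appended
theorem runA_of_not_infix (l : List Char) : ∀ st : List Char,
    ¬ ppapL <:+: st ++ l → runA st l = st ++ l := by
  induction l with
  | nil => intro st _; simp [runA_nil]
  | cons c l ih =>
    intro st h
    have hshape : st ++ c :: l = (st ++ [c]) ++ l := by simp
    have hstep : whileLoop (st ++ [c]) = st ++ [c] := by
      apply whileLoop_of_not_suffix
      intro hc
      exact h (hc.isInfix.trans (by rw [hshape]; exact (List.prefix_append _ _).isInfix))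
    rw [runA_cons, hstep, ih (st ++ [c]) (by rwa [← hshape]), ← hshape]

-- one global replace pass does not change A's result
theorem runA_repl (l : List Char) : ∀ st : List Char, runA st (repl l) = runA st l := by
  induction l using repl.induct with
  | case1 => intro st; rw [repl]
  | case2 c t hp ih =>
    intro st
    have hpre : ppapL <+: c :: t := List.isPrefixOf_iff_prefix.mp hp
    obtain ⟨y, hy⟩ := hpre
    have hy3 : t.drop 3 = y := by
      have := congrArg (List.drop 4) hy
      simpa [ppapL] using this.symm
    rw [repl, if_pos hp, runA_cons, ih, hy3, ← hy, runA_append, runA_ppap]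
  | case3 c t hp ih =>
    intro st
    rw [repl, if_neg hp, runA_cons, ih, ← runA_cons]

-- B's fixpoint loop computes exactly A's final stack
theorem loopB_eq_runA (l : List Char) : loopB l = runA [] l := by
  induction l using loopB.induct with
  | case1 l h ih =>
    rw [loopB, if_pos h, ih, replace_eq_repl, runA_repl]
  | case2 l h =>
    rw [loopB, if_neg h]
    have hni : ¬ ppapL <:+: l := fun hc =>
      h ((PySem.Chars.isIn_iff_infix ppapL l).mpr hc)
    have h0 := runA_of_not_infix l [] (by simpa using hni)
    simp only [List.nil_append] at h0
    exact h0.symm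

-- ===== VERDICT (by name: the statement is the Claim_ definition above) =====
theorem solution_spec : Claim_equal_solution := by
  intro S _
  unfold Spec_solution solution solution_alt
  rw [loopB_eq_runA]
  rfl
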